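-- pv_equiv track=rewrite | github.com/blegloannec/CodeProblems | ProjectEuler/121.py | cpt
-- ===== SOURCE A (Python) =====
-- memo = {}
--
-- def cpt(n,b):
--     if n==0:
--         return 1 if b==0 else 0
--     if (n,b) in memo:
--         return memo[n,b]
--     res = n*cpt(n-1,b)+cpt(n-1,b-1)
--     memo[n,b] = res
--     return res
-- ===== SOURCE B (Python) =====
-- def cpt(n, b):
--     # bottom-up 1-D DP over the row cpt(i, 0..b), no recursion, no memo dict
--     if b < 0 or b > n:
--         return 0
--     dp = [1] + [0] * b
--     for i in range(1, n + 1):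
--         dp = [i * x + y for x, y in zip(dp, [0] + dp)]
--     return dp[b]
-- ===== Notes on version B (the rewrite author's own statement) =====
-- stated objective: alternative
-- what changed: Replaces the top-down memoized recursion with a bottom-up iterative DP over a 1-D row of b+1 values, with no recursion and no memo dict.
import Mathlib
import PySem

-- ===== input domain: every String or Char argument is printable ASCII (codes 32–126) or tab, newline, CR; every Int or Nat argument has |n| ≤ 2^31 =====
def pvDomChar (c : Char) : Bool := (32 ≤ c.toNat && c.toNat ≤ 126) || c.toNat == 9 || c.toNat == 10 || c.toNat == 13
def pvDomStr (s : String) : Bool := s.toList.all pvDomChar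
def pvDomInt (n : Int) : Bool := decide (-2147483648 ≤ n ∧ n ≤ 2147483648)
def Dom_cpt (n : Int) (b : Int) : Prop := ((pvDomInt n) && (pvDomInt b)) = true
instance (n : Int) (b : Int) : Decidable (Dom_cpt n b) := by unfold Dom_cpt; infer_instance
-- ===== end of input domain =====

-- B is a bottom-up iterative 1-D DP for the same recurrence; return values proved equal for n ≥ 0.
-- A's module-global memo is ported as a dict threaded through the recursion (per-call cache, same values).

-- ===== PORT A =====
-- A's recursion 'cpt(n,b) = n*cpt(n-1,b)+cpt(n-1,b-1)', base n==0, with the memo dict keyed (n,b);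
-- structural recursion on the nonnegative n (Pre_cpt requires 0 ≤ n, where n.toNat recovers n exactly).
def cptGoA : Nat → Int → PySem.Dict (Int × Int) Int → Int × PySem.Dict (Int × Int) Int
  | 0, b, memo => ((if b = 0 then 1 else 0), memo)
  | Nat.succ k, b, memo =>
    let n : Int := ((k + 1 : Nat) : Int)
    match memo.get? (n, b) with
    | some v => (v, memo)
    | none =>
      let r1 := cptGoA k b memo
      let r2 := cptGoA k (b - 1) r1.2
      let res := n * r1.1 + r2.1
      (res, r2.2.insert (n, b) res)

def cpt (n : Int) (b : Int) : Int := (cptGoA n.toNat b PySem.Dict.empty).1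

-- ===== PORT B =====
-- dp = [i*x + y for x, y in zip(dp, [0] + dp)]
def stepRow (i : Int) (dp : List Int) : List Int :=
  List.zipWith (fun x y => i * x + y) dp (0 :: dp)

def cpt_alt (n : Int) (b : Int) : Int :=
  if b < 0 || b > n then 0
  else
    let dp0 : List Int := 1 :: List.replicate b.toNat 0
    let dp := (List.range n.toNat).foldl (fun (dp : List Int) (k : Nat) => stepRow ((k : Int) + 1) dp) dp0
    dp.getD b.toNat 0

-- ===== PRECONDITION & SPEC =====
-- Pre_ excludes n < 0, on which Python A recurses without a base case and raises RecursionError.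
def Pre_cpt (n : Int) (_b : Int) : Prop := 0 ≤ n
instance (n : Int) (b : Int) : Decidable (Pre_cpt n b) := by unfold Pre_cpt; infer_instance
def pvWitness_cpt : Int × Int := (5, 2)

def Spec_cpt (n : Int) (b : Int) (out : Int) : Prop := out = cpt_alt n b
instance (n : Int) (b : Int) (out : Int) : Decidable (Spec_cpt n b out) := by unfold Spec_cpt; infer_instance

-- ===== CLAIM (what is proved, stated in full; the proofs are below) =====
def Claim_equal_cpt : Prop := ∀ (n : Int) (b : Int), Dom_cpt n b → Pre_cpt n b → Spec_cpt n b (cpt n b)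

-- ===== LEMMAS AND PROOFS =====

-- the pure recurrence both ports compute: cptF m b = cpt(m, b)
def cptF : Nat → Int → Int
  | 0, b => if b = 0 then 1 else 0
  | Nat.succ m, b => (↑(m + 1) : Int) * cptF m b + cptF m (b - 1)

-- every value cached in the memo is correct
def GoodMemo (d : PySem.Dict (Int × Int) Int) : Prop :=
  ∀ p v, d.get? p = some v → v = cptF p.1.toNat p.2

theorem cptGoA_correct (m : Nat) (b : Int) (memo : PySem.Dict (Int × Int) Int)
    (h : GoodMemo memo) :
    (cptGoA m b memo).1 = cptF m b ∧ GoodMemo (cptGoA m b memo).2 := by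
  induction m generalizing b memo with
  | zero => exact ⟨rfl, h⟩
  | succ k ih =>
    simp only [cptGoA]
    cases hm : memo.get? (((k + 1 : Nat) : Int), b) with
    | some v =>
      refine ⟨?_, h⟩
      have := h _ _ hm
      simpa using this
    | none =>
      obtain ⟨h1, g1⟩ := ih b memo h
      obtain ⟨h2, g2⟩ := ih (b - 1) _ g1
      constructor
      · simp only [cptF, h1, h2]
      · intro p v hv
        rw [PySem.Dict.get?_insert] at hv
        split at hv
        · rename_i hp
          subst hp
          simp only [Option.some.injEq] at hv
          subst hv
          simp [h1, h2, cptF]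
        · exact g2 p v hv

-- cptF vanishes outside the triangle 0 ≤ b ≤ m
theorem cptF_zero (m : Nat) (b : Int) (h : b < 0 ∨ (m : Int) < b) : cptF m b = 0 := by
  induction m generalizing b with
  | zero =>
    simp only [cptF]
    rcases h with h | h <;> (rw [if_neg]; omega)
  | succ k ih =>
    simp only [cptF]
    rw [ih b (by omega), ih (b - 1) (by omega)]
    ring

-- the row after i steps is exactly the slice j ↦ cptF i j for j = 0..b
theorem rowInv (b i : Nat) :
    (List.range i).foldl (fun (dp : List Int) (k : Nat) => stepRow ((k : Int) + 1) dp) (1 :: List.replicate b 0)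
      = (List.range (b + 1)).map (fun (j : Nat) => cptF i (j : Int)) := by
  induction i with
  | zero =>
    simp only [List.range_zero, List.foldl_nil]
    rw [List.range_succ_eq_map]
    simp only [List.map_cons, List.map_map]
    have h0 : cptF 0 ((0 : Nat) : Int) = 1 := by simp [cptF]
    rw [h0]
    congr 1
    rw [show (List.replicate b (0 : Int)) = List.map (fun _ => (0:Int)) (List.range b) by
      simp [List.map_const']]
    apply List.map_congr_left
    intro j _
    simp only [Function.comp, cptF]
    rw [if_neg (by omega)]
  | succ k ih =>
    rw [List.range_succ, List.foldl_append, List.foldl_cons, List.foldl_nil, ih]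
    apply List.ext_getElem
    · simp [stepRow]
    · intro j h1 h2
      simp only [stepRow] at h1 ⊢
      rw [List.getElem_zipWith, List.getElem_map, List.getElem_range]
      have hj : j < b + 1 := by simpa [stepRow] using h1
      match j with
      | 0 =>
        simp only [List.getElem_cons_zero]
        simp only [List.getElem_map, List.getElem_range]
        show ((k:Int)+1) * cptF k ((0:Nat):Int) + 0 = cptF (k+1) ((0:Nat):Int)
        simp only [cptF]
        rw [cptF_zero k (((0:Nat):Int) - 1) (by left; simp)]
        push_cast; ring
      | Nat.succ m =>
        simp only [List.getElem_cons_succ, List.getElem_map, List.getElem_range]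
        show ((k:Int)+1) * cptF k (((m+1:Nat)):Int) + cptF k ((m:Nat):Int)
            = cptF (k+1) (((m+1:Nat)):Int)
        simp only [cptF]
        have : ((((m+1:Nat)):Int) - 1) = ((m:Nat):Int) := by push_cast; ring
        rw [this]
        push_cast; ring

theorem getD_map_range (b : Nat) (f : Nat → Int) :
    ((List.range (b + 1)).map f).getD b 0 = f b := by
  rw [List.getD_eq_getElem?_getD, List.getElem?_map, List.getElem?_range (by omega)]
  rfl

-- ===== VERDICT (by name: the statement is the Claim_ definition above) =====
theorem cpt_spec : Claim_equal_cpt := by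
  intro n b _ hpre
  unfold Spec_cpt cpt cpt_alt
  rw [(cptGoA_correct n.toNat b PySem.Dict.empty (by
        intro p v hv; rw [PySem.Dict.get?_empty] at hv; cases hv)).1]
  by_cases hb : b < 0 || b > n
  · rw [if_pos hb]
    apply cptF_zero
    simp only [Bool.or_eq_true, decide_eq_true_eq] at hb
    rcases hb with h | h
    · left; exact h
    · right; unfold Pre_cpt at hpre; omega
  · rw [if_neg hb]
    simp only [Bool.or_eq_true, decide_eq_true_eq, not_or, not_lt] at hb
    obtain ⟨hb0, hbn⟩ := hb
    simp only
    rw [rowInv b.toNat n.toNat, getD_map_range]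
    congr 1
    omega
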